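-- pv_equiv track=rewrite | github.com/CroissanceCommune/autonomie | autonomie/utils/html.py | strip_void_lines
-- ===== SOURCE A (Python) =====
-- TAGS_TO_CHECK = (('<p>', '</p>'), ('<div>', '</div>'),)
--
-- def remove_tag(text, tag):
--     """
--     Remove the tag from the beginning of the given text
--
--     :param str text: The text with the tag
--     :param str tag: The tag to remove
--     :rtype: str
--     """
--     return text[0:-1*len(tag)].strip()
--
-- def strip_whitespace(value):
--     """
--     Strip whitespace and tabs at the beginning/end of a string
--
--     :param str value: The value to clean
--     :rtype: str
--     """
--     if hasattr(value, 'strip'):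
--         value = value.strip(' \t')
--     return value
--
-- def strip_linebreaks(value):
--     """
--     Strip linebreaks
--
--     :param str value: The value to clean
--     :rtype: str
--     """
--     # we don't use rstrip since it's used for character stripping
--     # (not chain)
--     if hasattr(value, 'strip'):
--         value = value.strip('\n\r')
--         for tag in '<br />', '<br>', '<br/>':
--             if value.endswith(tag):
--                 value = remove_tag(value, tag)
--                 return strip_linebreaks(value)
--
--     return value
--
-- def strip_void_lines(value):
--     """
--     RStrip value ending with void html tags
--
--     :param str value: The value to clean
--     :rtype: str
--     """
--     if hasattr(value, 'strip'):
--         for tag, close_tag in TAGS_TO_CHECK: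
--             if value.endswith(close_tag):
--                 prec_value = remove_tag(value, close_tag)
--                 prec_value = strip_whitespace(prec_value)
--                 prec_value = strip_linebreaks(prec_value)
--                 if prec_value.endswith(tag):
--                     value = remove_tag(prec_value, tag)
--                     value = strip_whitespace(value)
--                     value = strip_linebreaks(value)
--                     return strip_void_lines(value)
--
--     return value
-- ===== SOURCE B (Python) =====
-- TAGS_TO_CHECK = (('<p>', '</p>'), ('<div>', '</div>'),)
--
-- BR_TAGS = ('<br />', '<br>', '<br/>')
--
--
-- def _clean(text):
--     """Fully strip the text, then iteratively drop trailing <br> variants."""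
--     text = text.strip()
--     while True:
--         for br in BR_TAGS:
--             if text.endswith(br):
--                 text = text[:-len(br)].strip()
--                 break
--         else:
--             return text
--
--
-- def strip_void_lines(value):
--     """
--     RStrip value ending with void html tags (iterative version)
--     """
--     if not hasattr(value, 'strip'):
--         return value
--     while True:
--         changed = False
--         for tag, close_tag in TAGS_TO_CHECK:
--             if value.endswith(close_tag):
--                 prec = _clean(value[:-len(close_tag)])
--                 if prec.endswith(tag):
--                     value = _clean(prec[:-len(tag)])
--                     changed = True
--                     break
--         if not changed:
--             return value
-- ===== Notes on version B (the rewrite author's own statement) =====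
-- stated objective: simpler
-- what changed: Replaced A's tail recursion (restart via `return strip_void_lines(...)`) and its three chained helpers (remove_tag/strip_whitespace/strip_linebreaks, itself recursive) by an explicit while-loop over the tag pairs with a single iterative `_clean` helper that fully strips and then drops trailing <br> variants in a loop.
import Mathlib
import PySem

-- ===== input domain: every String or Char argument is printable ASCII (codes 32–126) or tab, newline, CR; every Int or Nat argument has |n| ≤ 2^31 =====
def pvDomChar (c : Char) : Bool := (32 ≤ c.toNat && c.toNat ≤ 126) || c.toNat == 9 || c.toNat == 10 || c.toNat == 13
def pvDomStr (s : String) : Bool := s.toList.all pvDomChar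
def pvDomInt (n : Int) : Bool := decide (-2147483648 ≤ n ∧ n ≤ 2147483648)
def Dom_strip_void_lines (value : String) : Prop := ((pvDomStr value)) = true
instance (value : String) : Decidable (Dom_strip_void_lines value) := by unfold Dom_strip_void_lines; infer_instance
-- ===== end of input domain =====

-- B replaces A's tail recursion (restart via `return strip_void_lines(...)`) by an explicit
-- while-loop over the tag pairs with a single `_clean` helper that fully strips and then
-- iteratively drops trailing <br> variants (objective: simpler decomposition, same cost).

-- ===== PORT A =====

def remove_tag (text tag : List Char) : List Char :=
  PySem.Chars.strip (PySem.Chars.slice text (some 0) (some (-1 * (tag.length : Int))))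

def strip_whitespace (value : List Char) : List Char :=
  PySem.Chars.stripChars value (' ' :: '\t' :: [])

-- length lemmas cited by the ports' decreasing_by (termination only)
theorem pv_len_strip_le (s : List Char) : (PySem.Chars.strip s).length ≤ s.length := by
  unfold PySem.Chars.strip PySem.Chars.rstrip PySem.Chars.lstrip
  simp only [List.length_reverse]
  exact le_trans (List.length_dropWhile_le _ _) (by simpa using List.length_dropWhile_le _ _)

theorem pv_len_stripChars_le (s chars : List Char) :
    (PySem.Chars.stripChars s chars).length ≤ s.length := by
  unfold PySem.Chars.stripChars
  simp only [List.length_reverse]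
  exact le_trans (List.length_dropWhile_le _ _) (by simpa using List.length_dropWhile_le _ _)

theorem pv_remove_tag_eq (text tag : List Char) (h : 0 < tag.length) :
    remove_tag text tag = PySem.Chars.strip (text.take (text.length - tag.length)) := by
  unfold remove_tag
  rw [PySem.Chars.slice_eq_listSlice, PySem.List.slice_zero_start,
    show (-1 * (tag.length : Int)) = -(tag.length : Int) by ring,
    PySem.List.slice_to_neg_natCast text tag.length h]

theorem pv_len_remove_tag_le (text tag : List Char) (h : 0 < tag.length) :
    (remove_tag text tag).length ≤ text.length - tag.length := by
  rw [pv_remove_tag_eq text tag h]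
  exact le_trans (pv_len_strip_le _) (by simp [List.length_take])

theorem pv_slbk_step_lt (value tag : List Char) (h0 : 0 < tag.length)
    (h : PySem.Chars.endswith (PySem.Chars.stripChars value ('\n' :: '\r' :: [])) tag = true) :
    (remove_tag (PySem.Chars.stripChars value ('\n' :: '\r' :: [])) tag).length < value.length := by
  have hs := List.IsSuffix.length_le ((PySem.Chars.endswith_iff _ _).1 h)
  have hr := pv_len_remove_tag_le (PySem.Chars.stripChars value ('\n' :: '\r' :: [])) tag h0
  have hc := pv_len_stripChars_le value ('\n' :: '\r' :: [])
  omega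

def strip_linebreaks (value : List Char) : List Char :=
  let v := PySem.Chars.stripChars value ('\n' :: '\r' :: [])
  if h1 : PySem.Chars.endswith v "<br />".toList then
    strip_linebreaks (remove_tag v "<br />".toList)
  else if h2 : PySem.Chars.endswith v "<br>".toList then
    strip_linebreaks (remove_tag v "<br>".toList)
  else if h3 : PySem.Chars.endswith v "<br/>".toList then
    strip_linebreaks (remove_tag v "<br/>".toList)
  else v
termination_by value.length
decreasing_by
  · exact pv_slbk_step_lt value "<br />".toList (by decide) h1
  · exact pv_slbk_step_lt value "<br>".toList (by decide) h2
  · exact pv_slbk_step_lt value "<br/>".toList (by decide) h3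

theorem pv_len_slbk_le : ∀ (v : List Char), (strip_linebreaks v).length ≤ v.length := by
  intro v
  induction hn : v.length using Nat.strong_induction_on generalizing v with
  | _ n ih =>
    subst hn
    rw [strip_linebreaks]
    have h2 := pv_len_stripChars_le v ('\n' :: '\r' :: [])
    split_ifs with hb1 hb2 hb3
    · have hs := List.IsSuffix.length_le ((PySem.Chars.endswith_iff _ _).1 hb1)
      have hb : 0 < ("<br />".toList).length := by decide
      have hr := pv_len_remove_tag_le (PySem.Chars.stripChars v ('\n' :: '\r' :: [])) _ hb
      have := ih _ (by omega) (remove_tag (PySem.Chars.stripChars v ('\n' :: '\r' :: [])) "<br />".toList) rfl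
      omega
    · have hs := List.IsSuffix.length_le ((PySem.Chars.endswith_iff _ _).1 hb2)
      have hb : 0 < ("<br>".toList).length := by decide
      have hr := pv_len_remove_tag_le (PySem.Chars.stripChars v ('\n' :: '\r' :: [])) _ hb
      have := ih _ (by omega) (remove_tag (PySem.Chars.stripChars v ('\n' :: '\r' :: [])) "<br>".toList) rfl
      omega
    · have hs := List.IsSuffix.length_le ((PySem.Chars.endswith_iff _ _).1 hb3)
      have hb : 0 < ("<br/>".toList).length := by decide
      have hr := pv_len_remove_tag_le (PySem.Chars.stripChars v ('\n' :: '\r' :: [])) _ hb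
      have := ih _ (by omega) (remove_tag (PySem.Chars.stripChars v ('\n' :: '\r' :: [])) "<br/>".toList) rfl
      omega
    · exact h2

theorem pv_pipe_le (x : List Char) :
    (strip_linebreaks (strip_whitespace x)).length ≤ x.length :=
  le_trans (pv_len_slbk_le _) (pv_len_stripChars_le _ _)

theorem pv_step_lt (value tagO tagC : List Char) (hO : 0 < tagO.length) (hC : 0 < tagC.length)
    (h1 : PySem.Chars.endswith value tagC = true) :
    (strip_linebreaks (strip_whitespace (remove_tag
      (strip_linebreaks (strip_whitespace (remove_tag value tagC))) tagO))).length
      < value.length := by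
  have hs := List.IsSuffix.length_le ((PySem.Chars.endswith_iff _ _).1 h1)
  have e1 := pv_len_remove_tag_le value tagC hC
  have e2 := pv_pipe_le (remove_tag value tagC)
  have e3 := pv_pipe_le (remove_tag (strip_linebreaks (strip_whitespace (remove_tag value tagC))) tagO)
  have e4 := pv_len_remove_tag_le (strip_linebreaks (strip_whitespace (remove_tag value tagC))) tagO hO
  omega

def strip_void_lines_l (value : List Char) : List Char :=
  if h1 : PySem.Chars.endswith value "</p>".toList then
    if h2 : PySem.Chars.endswith (strip_linebreaks (strip_whitespace (remove_tag value "</p>".toList))) "<p>".toList then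
      strip_void_lines_l (strip_linebreaks (strip_whitespace
        (remove_tag (strip_linebreaks (strip_whitespace (remove_tag value "</p>".toList))) "<p>".toList)))
    else if h3 : PySem.Chars.endswith value "</div>".toList then
      if h4 : PySem.Chars.endswith (strip_linebreaks (strip_whitespace (remove_tag value "</div>".toList))) "<div>".toList then
        strip_void_lines_l (strip_linebreaks (strip_whitespace
          (remove_tag (strip_linebreaks (strip_whitespace (remove_tag value "</div>".toList))) "<div>".toList)))
      else value
    else value
  else if h3 : PySem.Chars.endswith value "</div>".toList then
    if h4 : PySem.Chars.endswith (strip_linebreaks (strip_whitespace (remove_tag value "</div>".toList))) "<div>".toList then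
      strip_void_lines_l (strip_linebreaks (strip_whitespace
        (remove_tag (strip_linebreaks (strip_whitespace (remove_tag value "</div>".toList))) "<div>".toList)))
    else value
  else value
termination_by value.length
decreasing_by
  · exact pv_step_lt value "<p>".toList "</p>".toList (by decide) (by decide) h1
  · exact pv_step_lt value "<div>".toList "</div>".toList (by decide) (by decide) h3
  · exact pv_step_lt value "<div>".toList "</div>".toList (by decide) (by decide) h3

def strip_void_lines (value : String) : String :=
  String.mk (strip_void_lines_l value.toList)

-- ===== PORT B =====

-- text[:-len(suf)].strip()
def drop_suffix_strip (text suf : List Char) : List Char :=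
  PySem.Chars.strip (PySem.Chars.slice text none (some (-(suf.length : Int))))

theorem pv_dss_eq (text suf : List Char) (h : 0 < suf.length) :
    drop_suffix_strip text suf = PySem.Chars.strip (text.take (text.length - suf.length)) := by
  unfold drop_suffix_strip
  rw [PySem.Chars.slice_eq_listSlice, PySem.List.slice_to_neg_natCast text suf.length h]

theorem pv_dss_lt (text suf : List Char) (h : 0 < suf.length)
    (hsuf : PySem.Chars.endswith text suf = true) :
    (drop_suffix_strip text suf).length < text.length := by
  have hs := List.IsSuffix.length_le ((PySem.Chars.endswith_iff _ _).1 hsuf)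
  rw [pv_dss_eq text suf h]
  have := pv_len_strip_le (text.take (text.length - suf.length))
  simp only [List.length_take] at this
  omega

def clean_go (text : List Char) : List Char :=
  if h1 : PySem.Chars.endswith text "<br />".toList then
    clean_go (drop_suffix_strip text "<br />".toList)
  else if h2 : PySem.Chars.endswith text "<br>".toList then
    clean_go (drop_suffix_strip text "<br>".toList)
  else if h3 : PySem.Chars.endswith text "<br/>".toList then
    clean_go (drop_suffix_strip text "<br/>".toList)
  else text
termination_by text.length
decreasing_by
  · exact pv_dss_lt text "<br />".toList (by decide) h1
  · exact pv_dss_lt text "<br>".toList (by decide) h2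
  · exact pv_dss_lt text "<br/>".toList (by decide) h3

def clean (text : List Char) : List Char :=
  clean_go (PySem.Chars.strip text)

-- one iteration of B's inner `for` body for one (tag, close_tag) pair
def try_pair (value tag close : List Char) : Option (List Char) :=
  if PySem.Chars.endswith value close then
    if PySem.Chars.endswith (clean (PySem.Chars.slice value none (some (-(close.length : Int))))) tag then
      some (clean (PySem.Chars.slice (clean (PySem.Chars.slice value none (some (-(close.length : Int)))))
        none (some (-(tag.length : Int)))))
    else none
  else none

def alt_step (value : List Char) : Option (List Char) :=
  match try_pair value "<p>".toList "</p>".toList with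
  | some v => some v
  | none => try_pair value "<div>".toList "</div>".toList

theorem pv_len_clean_go_le : ∀ (t : List Char), (clean_go t).length ≤ t.length := by
  intro t
  induction hn : t.length using Nat.strong_induction_on generalizing t with
  | _ n ih =>
    subst hn
    rw [clean_go]
    split_ifs with hb1 hb2 hb3
    · have := pv_dss_lt t "<br />".toList (by decide) hb1
      have := ih _ this (drop_suffix_strip t "<br />".toList) rfl
      omega
    · have := pv_dss_lt t "<br>".toList (by decide) hb2
      have := ih _ this (drop_suffix_strip t "<br>".toList) rfl
      omega
    · have := pv_dss_lt t "<br/>".toList (by decide) hb3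
      have := ih _ this (drop_suffix_strip t "<br/>".toList) rfl
      omega
    · exact le_rfl

theorem pv_len_clean_le (t : List Char) : (clean t).length ≤ t.length :=
  le_trans (pv_len_clean_go_le _) (pv_len_strip_le _)

theorem pv_try_pair_lt (value tag close v' : List Char) (ht : 0 < tag.length) (hc : 0 < close.length)
    (h : try_pair value tag close = some v') : v'.length < value.length := by
  unfold try_pair at h
  rw [PySem.Chars.slice_eq_listSlice, PySem.List.slice_to_neg_natCast value close.length hc] at h
  split at h
  · split at h
    · cases h
      have hs := List.IsSuffix.length_le ((PySem.Chars.endswith_iff _ _).1 (by assumption :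
        PySem.Chars.endswith value close = true))
      have hp : (clean (value.take (value.length - close.length))).length < value.length := by
        have := pv_len_clean_le (value.take (value.length - close.length))
        simp only [List.length_take] at this
        omega
      rw [PySem.Chars.slice_eq_listSlice, PySem.List.slice_to_neg_natCast _ tag.length ht]
      have := pv_len_clean_le ((clean (value.take (value.length - close.length))).take
        ((clean (value.take (value.length - close.length))).length - tag.length))
      simp only [List.length_take] at this
      omega
    · exact absurd h (by simp)
  · exact absurd h (by simp)

theorem pv_alt_step_lt (value v' : List Char) (h : alt_step value = some v') :
    v'.length < value.length := by
  unfold alt_step at h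
  split at h
  · rename_i heq
    cases h
    exact pv_try_pair_lt value _ _ _ (by decide) (by decide) heq
  · exact pv_try_pair_lt value _ _ _ (by decide) (by decide) h

def alt_go (value : List Char) : List Char :=
  match h : alt_step value with
  | some v' => alt_go v'
  | none => value
termination_by value.length
decreasing_by exact pv_alt_step_lt value v' h

def strip_void_lines_alt (value : String) : String :=
  String.mk (alt_go value.toList)

-- ===== PRECONDITION & SPEC =====
def Spec_strip_void_lines (value : String) (out : String) : Prop := out = strip_void_lines_alt value
instance (value : String) (out : String) : Decidable (Spec_strip_void_lines value out) := by unfold Spec_strip_void_lines; infer_instance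

-- ===== CLAIM (what is proved, stated in full; the proofs are below) =====
def Claim_equal_strip_void_lines : Prop := ∀ (value : String), Dom_strip_void_lines value → Spec_strip_void_lines value (strip_void_lines value)

-- ===== LEMMAS AND PROOFS =====

theorem pv_dropWhile_subset {α : Type} (p q : α → Bool) (h : ∀ a, p a = true → q a = true) :
    ∀ (l : List α), (l.dropWhile q).dropWhile p = l.dropWhile q := by
  intro l
  induction l with
  | nil => simp
  | cons a l ih =>
    by_cases hq : q a = true
    · simp only [List.dropWhile_cons_of_pos hq]
      exact ih
    · have hp : ¬ p a = true := fun hp => hq (h a hp)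
      simp only [List.dropWhile_cons_of_neg hq, List.dropWhile_cons_of_neg hp]

theorem pv_head_dropWhile {α : Type} (q : α → Bool) : ∀ (l : List α) (a : α) (t : List α),
    l.dropWhile q = a :: t → q a = false := by
  intro l
  induction l with
  | nil => intro a t h; simp at h
  | cons b l ih =>
    intro a t h
    by_cases hq : q b = true
    · rw [List.dropWhile_cons_of_pos hq] at h
      exact ih a t h
    · rw [List.dropWhile_cons_of_neg hq] at h
      cases h
      simpa using hq

theorem pv_stripChars_strip (s chars : List Char)
    (hsub : ∀ c ∈ chars, PySem.Chars.isspace c = true) :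
    PySem.Chars.stripChars (PySem.Chars.strip s) chars = PySem.Chars.strip s := by
  have hsub' : ∀ c, chars.contains c = true → PySem.Chars.isspace c = true := by
    intro c hc
    exact hsub c (by simpa using hc)
  unfold PySem.Chars.stripChars PySem.Chars.strip PySem.Chars.rstrip PySem.Chars.lstrip
  change (List.dropWhile (fun c => chars.contains c)
      ((List.dropWhile (fun c => chars.contains c)
        ((List.dropWhile PySem.Chars.isspace
          (List.dropWhile PySem.Chars.isspace s).reverse).reverse)).reverse)).reverse
      = (List.dropWhile PySem.Chars.isspace (List.dropWhile PySem.Chars.isspace s).reverse).reverse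
  have h1 : List.dropWhile (fun c => chars.contains c)
      ((List.dropWhile PySem.Chars.isspace (List.dropWhile PySem.Chars.isspace s).reverse).reverse) =
      (List.dropWhile PySem.Chars.isspace (List.dropWhile PySem.Chars.isspace s).reverse).reverse := by
    cases hT : (List.dropWhile PySem.Chars.isspace
        (List.dropWhile PySem.Chars.isspace s).reverse).reverse with
    | nil => simp
    | cons a t' =>
      obtain ⟨u, hu⟩ := List.dropWhile_suffix (l := (List.dropWhile PySem.Chars.isspace s).reverse)
        (p := PySem.Chars.isspace)
      have hL : List.dropWhile PySem.Chars.isspace s = a :: (t' ++ u.reverse) := by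
        have h' := congrArg List.reverse hu
        rw [List.reverse_append, List.reverse_reverse, hT] at h'
        rw [← h']
        simp
      have ha := pv_head_dropWhile PySem.Chars.isspace s a _ hL
      have hpa : chars.contains a = false := by
        cases hca : chars.contains a
        · rfl
        · exact absurd (hsub' a hca) (by simp [ha])
      rw [List.dropWhile_cons_of_neg (by simpa using hpa)]
  rw [h1, List.reverse_reverse,
    pv_dropWhile_subset (fun c => chars.contains c) PySem.Chars.isspace hsub']

theorem pv_ws_strip (s : List Char) :
    strip_whitespace (PySem.Chars.strip s) = PySem.Chars.strip s := by
  unfold strip_whitespace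
  exact pv_stripChars_strip s _ (by intro c hc; simp at hc; rcases hc with rfl | rfl <;> decide)

theorem pv_nr_strip (s : List Char) :
    PySem.Chars.stripChars (PySem.Chars.strip s) ('\n' :: '\r' :: []) = PySem.Chars.strip s :=
  pv_stripChars_strip s _ (by intro c hc; simp at hc; rcases hc with rfl | rfl <;> decide)

theorem pv_slbk_clean : ∀ (z : List Char),
    strip_linebreaks (PySem.Chars.strip z) = clean_go (PySem.Chars.strip z) := by
  intro z
  induction hn : z.length using Nat.strong_induction_on generalizing z with
  | _ n ih =>
    subst hn
    rw [strip_linebreaks, clean_go, pv_nr_strip]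
    have hlen := pv_len_strip_le z
    split_ifs with hb1 hb2 hb3
    · have hs := List.IsSuffix.length_le ((PySem.Chars.endswith_iff _ _).1 hb1)
      have hb : 0 < ("<br />".toList).length := by decide
      rw [pv_remove_tag_eq _ _ hb, pv_dss_eq _ _ hb]
      exact ih _ (by simp only [List.length_take]; omega) _ rfl
    · have hs := List.IsSuffix.length_le ((PySem.Chars.endswith_iff _ _).1 hb2)
      have hb : 0 < ("<br>".toList).length := by decide
      rw [pv_remove_tag_eq _ _ hb, pv_dss_eq _ _ hb]
      exact ih _ (by simp only [List.length_take]; omega) _ rfl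
    · have hs := List.IsSuffix.length_le ((PySem.Chars.endswith_iff _ _).1 hb3)
      have hb : 0 < ("<br/>".toList).length := by decide
      rw [pv_remove_tag_eq _ _ hb, pv_dss_eq _ _ hb]
      exact ih _ (by simp only [List.length_take]; omega) _ rfl
    · rfl

theorem pv_pipe_clean (value close : List Char) (h : 0 < close.length) :
    strip_linebreaks (strip_whitespace (remove_tag value close))
      = clean (PySem.Chars.slice value none (some (-(close.length : Int)))) := by
  rw [pv_remove_tag_eq value close h, PySem.Chars.slice_eq_listSlice,
    PySem.List.slice_to_neg_natCast value close.length h]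
  unfold clean
  rw [pv_ws_strip]
  exact pv_slbk_clean _

theorem pv_try_pair_pos (value tag close : List Char)
    (hc : PySem.Chars.endswith value close = true)
    (ht : PySem.Chars.endswith
      (clean (PySem.Chars.slice value none (some (-(close.length : Int))))) tag = true) :
    try_pair value tag close = some (clean (PySem.Chars.slice
      (clean (PySem.Chars.slice value none (some (-(close.length : Int)))))
      none (some (-(tag.length : Int))))) := by
  unfold try_pair
  rw [if_pos hc, if_pos ht]

theorem pv_try_pair_none₁ (value tag close : List Char)
    (hc : PySem.Chars.endswith value close = false) : try_pair value tag close = none := by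
  simp [try_pair, hc]

theorem pv_try_pair_none₂ (value tag close : List Char)
    (hc : PySem.Chars.endswith value close = true)
    (ht : PySem.Chars.endswith
      (clean (PySem.Chars.slice value none (some (-(close.length : Int))))) tag = false) :
    try_pair value tag close = none := by
  unfold try_pair
  rw [if_pos hc, ht]
  simp

theorem pv_alt_go_some (value v' : List Char) (h : alt_step value = some v') :
    alt_go value = alt_go v' := by
  rw [alt_go]
  split <;> simp_all

theorem pv_alt_go_none (value : List Char) (h : alt_step value = none) :
    alt_go value = value := by
  rw [alt_go]
  split <;> simp_all

theorem pv_alt_step_p {v u : List Char}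
    (h : try_pair v "<p>".toList "</p>".toList = some u) : alt_step v = some u := by
  unfold alt_step
  rw [h]

theorem pv_main_div (v : List Char)
    (ih : ∀ w : List Char, w.length < v.length → strip_void_lines_l w = alt_go w)
    (hp : try_pair v "<p>".toList "</p>".toList = none) :
    (if h3 : PySem.Chars.endswith v "</div>".toList then
      if h4 : PySem.Chars.endswith
          (strip_linebreaks (strip_whitespace (remove_tag v "</div>".toList))) "<div>".toList then
        strip_void_lines_l (strip_linebreaks (strip_whitespace
          (remove_tag (strip_linebreaks (strip_whitespace (remove_tag v "</div>".toList)))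
            "<div>".toList)))
      else v
    else v) = alt_go v := by
  have hstep_eq : alt_step v = try_pair v "<div>".toList "</div>".toList := by
    unfold alt_step
    rw [hp]
  by_cases h3 : PySem.Chars.endswith v "</div>".toList = true
  · have hprecD := pv_pipe_clean v "</div>".toList (by decide)
    by_cases h4 : PySem.Chars.endswith
        (strip_linebreaks (strip_whitespace (remove_tag v "</div>".toList))) "<div>".toList = true
    · rw [dif_pos h3, dif_pos h4, hprecD,
        pv_pipe_clean (clean (PySem.Chars.slice v none (some (-(("</div>".toList.length : Nat) : Int)))))
          "<div>".toList (by decide)]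
      rw [hprecD] at h4
      have hstep := hstep_eq.trans (pv_try_pair_pos v _ _ h3 h4)
      rw [pv_alt_go_some v _ hstep]
      exact ih _ (pv_alt_step_lt v _ hstep)
    · rw [hprecD] at h4
      have h4f := Bool.eq_false_iff.mpr h4
      rw [dif_pos h3, dif_neg (by rw [hprecD]; exact h4)]
      exact (pv_alt_go_none v (hstep_eq.trans (pv_try_pair_none₂ v _ _ h3 h4f))).symm
  · rw [dif_neg h3]
    exact (pv_alt_go_none v (hstep_eq.trans
      (pv_try_pair_none₁ v _ _ (Bool.eq_false_iff.mpr h3)))).symm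

theorem pv_main : ∀ (v : List Char), strip_void_lines_l v = alt_go v := by
  intro v
  induction hn : v.length using Nat.strong_induction_on generalizing v with
  | _ n ih =>
    subst hn
    have ih' : ∀ w : List Char, w.length < v.length → strip_void_lines_l w = alt_go w :=
      fun w hw => ih w.length hw w rfl
    rw [strip_void_lines_l]
    by_cases h1 : PySem.Chars.endswith v "</p>".toList = true
    · have hprecP := pv_pipe_clean v "</p>".toList (by decide)
      by_cases h2 : PySem.Chars.endswith
          (strip_linebreaks (strip_whitespace (remove_tag v "</p>".toList))) "<p>".toList = true
      · rw [dif_pos h1, dif_pos h2, hprecP,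
          pv_pipe_clean (clean (PySem.Chars.slice v none (some (-(("</p>".toList.length : Nat) : Int)))))
            "<p>".toList (by decide)]
        rw [hprecP] at h2
        have hstep := pv_alt_step_p (pv_try_pair_pos v _ _ h1 h2)
        rw [pv_alt_go_some v _ hstep]
        exact ih' _ (pv_alt_step_lt v _ hstep)
      · rw [dif_pos h1, dif_neg h2]
        have h2f : PySem.Chars.endswith
            (clean (PySem.Chars.slice v none (some (-(("</p>".toList.length : Nat) : Int)))))
            "<p>".toList = false := by
          rw [← hprecP]
          exact Bool.eq_false_iff.mpr h2
        exact pv_main_div v ih' (pv_try_pair_none₂ v _ _ h1 h2f)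
    · rw [dif_neg h1]
      exact pv_main_div v ih' (pv_try_pair_none₁ v _ _ (Bool.eq_false_iff.mpr h1))

-- ===== VERDICT (by name: the statement is the Claim_ definition above) =====
theorem strip_void_lines_spec : Claim_equal_strip_void_lines := by
  intro value _
  unfold Spec_strip_void_lines strip_void_lines strip_void_lines_alt
  rw [pv_main]
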